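-- pv_equiv track=rewrite | github.com/dafyddstephenson/ucla-roms | Tools-Roms/mpc/passes/f77_to_f95.py | _fix_integer
-- ===== SOURCE A (Python) =====
-- def _first_nonblank(text):
--     """Return the index of the first non-space/tab character."""
--     i = 0
--     while i < len(text) and text[i] in (" ", "\t"):
--         i += 1
--     return i
--
-- def _next_token_end(text, start, terminators=(" ", "\t", ",", ")")):
--     """
--     Scan forward from 'start' until reaching any terminator character.
--     Returns the index just past the end of the token.
--     """
--     i = start
--     while i < len(text) and text[i] not in terminators:
--         i += 1
--     return i
--
-- def _fix_integer(text):
--     """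
--     INTEGER*X → INTEGER(kind=X)
--     INTEGER   → INTEGER(kind=4)
--     INTEGER(kind=...) is left unchanged.
--
--     All matching is case-insensitive and depends on INTEGER being the
--     first nonblank token.
--     """
--     l = len(text)
--     istr = _first_nonblank(text)
--     if istr + 6 >= l:
--         return text
--
--     if text[istr:istr+7].lower() != "integer":
--         return text
--
--     i = istr + 6   # index of 'R'
--     j = i + 1
--
--     # skip blanks
--     while j < l and text[j] == " ":
--         j += 1
--
--     # INTEGER*X
--     if j < l and text[j] == "*":
--         k = _next_token_end(text, j + 1)
--         size = text[j+1:k]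
--         if size:
--             return text[:i+1] + f"(kind={size})" + text[k:]
--         return text
--
--     # INTEGER(...)
--     if j < l and text[j] == "(":
--         return text  # already F90-style
--
--     # default-size INTEGER
--     is_default = (j > i+1) or j >= l or text[j] in (" ", ",")
--     if is_default:
--         return text[:i+1] + "(kind=4)" + text[i+1:]
--
--     return text
-- ===== SOURCE B (Python) =====
-- def _fix_integer(text):
--     """
--     INTEGER*X -> INTEGER(kind=X); INTEGER -> INTEGER(kind=4);
--     INTEGER(kind=...) unchanged.  Single left-to-right finite-state
--     machine over the characters, instead of staged index scans.
--     """
--     LEAD, KEY, AFTER, SIZE = 0, 1, 2, 3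
--     state, k, sp, size = LEAD, 0, 0, []
--     p, n = 0, len(text)
--     while p <= n:
--         c = text[p] if p < n else None
--         if state == LEAD:
--             if c in (" ", "\t"):
--                 p += 1
--             else:
--                 state = KEY
--         elif state == KEY:
--             if c is not None and c.lower() == "integer"[k]:
--                 k += 1
--                 p += 1
--                 if k == 7:
--                     state = AFTER
--             else:
--                 return text
--         elif state == AFTER:
--             if c == " ":
--                 sp += 1
--                 p += 1
--             elif c == "*":
--                 state = SIZE
--                 p += 1
--             elif c == "(":
--                 return text
--             elif c is None or c == "," or sp > 0:
--                 return text[:p - sp] + "(kind=4)" + text[p - sp:]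
--             else:
--                 return text
--         else:  # SIZE
--             if c is None or c in (" ", "\t", ",", ")"):
--                 if size:
--                     return (text[:p - sp - 1 - len(size)]
--                             + "(kind=" + "".join(size) + ")" + text[p:])
--                 return text
--             size.append(c)
--             p += 1
--     return text
-- ===== Notes on version B (the rewrite author's own statement) =====
-- stated objective: alternative
-- what changed: Replaced A's staged index scans (find-first-nonblank, 7-char slice keyword test, blank-skip loop, token-end scan, then slicing by saved positions) with a single left-to-right finite-state machine (states LEAD/KEY/AFTER/SIZE) that matches the keyword character by character and collects the size token as it goes.
import Mathlib
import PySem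

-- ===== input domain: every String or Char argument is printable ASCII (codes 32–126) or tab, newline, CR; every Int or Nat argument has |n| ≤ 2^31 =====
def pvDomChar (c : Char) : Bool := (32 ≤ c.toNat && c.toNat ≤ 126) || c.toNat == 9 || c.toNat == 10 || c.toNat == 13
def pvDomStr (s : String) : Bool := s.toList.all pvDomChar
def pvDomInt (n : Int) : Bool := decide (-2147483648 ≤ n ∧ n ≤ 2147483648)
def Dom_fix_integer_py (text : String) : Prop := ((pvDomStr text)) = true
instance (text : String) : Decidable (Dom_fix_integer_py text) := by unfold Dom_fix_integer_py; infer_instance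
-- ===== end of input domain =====

-- B replaces A's staged index scans with a single left-to-right finite-state machine (objective: alternative decomposition; not faster).

-- ===== PORT A =====
-- The three Python while-loops (in _first_nonblank, _next_token_end and the inline
-- blank-skip) are the same scan-while-predicate-holds loop; pvScan is that loop.
def pvScan (p : Char → Bool) (cs : List Char) (i : Nat) : Nat :=
  if h : i < cs.length then
    if p cs[i] then pvScan p cs (i+1) else i
  else i
termination_by cs.length - i

-- Python slices text[istr:istr+7], text[j+1:k], text[:i+1], text[k:] have nonnegative
-- bounds here, so drop/take is exact; text[j] is only read under the guard j < l.
def fix_integer_py (text : String) : String :=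
  let cs := text.toList
  let l := cs.length
  let istr := pvScan (fun c => c == ' ' || c == '\t') cs 0        -- _first_nonblank(text)
  if istr + 6 ≥ l then text
  else if PySem.Chars.lower ((cs.drop istr).take 7) ≠ "integer".toList then text
  else
    let i := istr + 6
    let j := pvScan (fun c => c == ' ') cs (i+1)                  -- skip blanks
    if j < l ∧ cs.getD j ' ' = '*' then
      let k := pvScan (fun c => !(c == ' ' || c == '\t' || c == ',' || c == ')')) cs (j+1)  -- _next_token_end
      let size := (cs.drop (j+1)).take (k - (j+1))
      if size ≠ [] then String.ofList (cs.take (i+1) ++ "(kind=".toList ++ size ++ [')'] ++ cs.drop k)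
      else text
    else if j < l ∧ cs.getD j ' ' = '(' then text
    else if i+1 < j ∨ l ≤ j ∨ cs.getD j ' ' = ' ' ∨ cs.getD j ' ' = ',' then
      String.ofList (cs.take (i+1) ++ "(kind=4)".toList ++ cs.drop (i+1))
    else text

-- ===== PORT B =====
-- Source B's while-loop with a state variable becomes one recursive function per state
-- (LEAD/KEY/AFTER/SIZE); 'c = text[p] if p < n else None' is the dite on p < cs.length,
-- Python c.lower() is PySem.Chars.lowerChar (exact on the ASCII domain).

-- state SIZE: collect the size token until a terminator / end of line
def pvSize (cs : List Char) (p sp : Nat) (tok : List Char) : String :=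
  if h : p < cs.length then
    if cs[p] = ' ' ∨ cs[p] = '\t' ∨ cs[p] = ',' ∨ cs[p] = ')' then
      if tok ≠ [] then
        String.ofList (cs.take (p - sp - 1 - tok.length) ++ "(kind=".toList ++ tok ++ [')'] ++ cs.drop p)
      else String.ofList cs
    else pvSize cs (p+1) sp (tok ++ [cs[p]])
  else
    if tok ≠ [] then
      String.ofList (cs.take (p - sp - 1 - tok.length) ++ "(kind=".toList ++ tok ++ [')'] ++ cs.drop p)
    else String.ofList cs
termination_by cs.length - p

-- state AFTER: just past the R, buffering the run of spaces (sp of them)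
def pvAfter (cs : List Char) (p sp : Nat) : String :=
  if h : p < cs.length then
    if cs[p] = ' ' then pvAfter cs (p+1) (sp+1)
    else if cs[p] = '*' then pvSize cs (p+1) sp []
    else if cs[p] = '(' then String.ofList cs
    else if cs[p] = ',' ∨ 0 < sp then
      String.ofList (cs.take (p - sp) ++ "(kind=4)".toList ++ cs.drop (p - sp))
    else String.ofList cs
  else String.ofList (cs.take (p - sp) ++ "(kind=4)".toList ++ cs.drop (p - sp))
termination_by cs.length - p

-- state KEY: match "integer"[k] case-insensitively, char by char
def pvKey (cs : List Char) (p k : Nat) : String :=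
  if k < 7 then
    match cs[p]? with
    | some c =>
        if PySem.Chars.lowerChar c = "integer".toList.getD k ' ' then pvKey cs (p+1) (k+1)
        else String.ofList cs
    | none => String.ofList cs
  else pvAfter cs p 0
termination_by 7 - k

-- state LEAD: pass over leading blanks
def pvLead (cs : List Char) (p : Nat) : String :=
  if h : p < cs.length then
    if cs[p] = ' ' ∨ cs[p] = '\t' then pvLead cs (p+1) else pvKey cs p 0
  else pvKey cs p 0
termination_by cs.length - p

def fix_integer_py_alt (text : String) : String := pvLead text.toList 0

-- ===== PRECONDITION & SPEC =====
def Spec_fix_integer_py (text : String) (out : String) : Prop := out = fix_integer_py_alt text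
instance (text : String) (out : String) : Decidable (Spec_fix_integer_py text out) := by unfold Spec_fix_integer_py; infer_instance

-- ===== CLAIM (what is proved, stated in full; the proofs are below) =====
def Claim_equal_fix_integer_py : Prop := ∀ (text : String), Dom_fix_integer_py text → Spec_fix_integer_py text (fix_integer_py text)

-- ===== LEMMAS AND PROOFS =====

theorem pvScan_eq (p : Char → Bool) (cs : List Char) (i : Nat) :
    pvScan p cs i = i + ((cs.drop i).takeWhile p).length := by
  fun_induction pvScan p cs i with
  | case1 i h hp ih =>
      rw [ih, List.drop_eq_getElem_cons h, List.takeWhile_cons_of_pos hp]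
      simp; omega
  | case2 i h hp =>
      rw [List.drop_eq_getElem_cons h, List.takeWhile_cons_of_neg hp]
      simp
  | case3 i h =>
      rw [List.drop_eq_nil_of_le (by omega)]
      simp

theorem drop_len_takeWhile (p : Char → Bool) (cs : List Char) :
    cs.drop ((cs.takeWhile p).length) = cs.dropWhile p := by
  induction cs with
  | nil => simp
  | cons a l ih =>
    by_cases h : p a <;> simp [h, ih]

theorem take_len_takeWhile (p : Char → Bool) (cs : List Char) :
    cs.take ((cs.takeWhile p).length) = cs.takeWhile p := by
  induction cs with
  | nil => simp
  | cons a l ih =>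
    by_cases h : p a <;> simp [h, ih]

theorem len_lower (cs : List Char) : (PySem.Chars.lower cs).length = cs.length := by
  simp [PySem.Chars.lower]

theorem lower_cons (c : Char) (cs : List Char) :
    PySem.Chars.lower (c :: cs) = PySem.Chars.lowerChar c :: PySem.Chars.lower cs := by
  simp [PySem.Chars.lower]

-- state SIZE ends at the first terminator; the final token is tok ++ that run
theorem pvSize_eq (cs : List Char) (p sp : Nat) (tok : List Char) :
    pvSize cs p sp tok =
      (let w := (cs.drop p).takeWhile (fun c => !(c == ' ' || c == '\t' || c == ',' || c == ')'));
       let k := p + w.length;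
       if tok ++ w ≠ [] then
         String.ofList (cs.take (k - sp - 1 - (tok ++ w).length) ++ "(kind=".toList ++ (tok ++ w) ++ [')'] ++ cs.drop k)
       else String.ofList cs) := by
  fun_induction pvSize cs p sp tok with
  | case1 p tok h ht htok =>
      have hw : (cs.drop p).takeWhile (fun c => !(c == ' ' || c == '\t' || c == ',' || c == ')')) = [] := by
        rw [List.drop_eq_getElem_cons h]
        exact List.takeWhile_cons_of_neg (by rcases ht with h'|h'|h'|h' <;> simp [h'])
      rw [hw]
      simp only [List.append_nil, Nat.add_zero, List.length_nil]
      rw [if_pos htok]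
  | case2 p tok h ht htok =>
      have hw : (cs.drop p).takeWhile (fun c => !(c == ' ' || c == '\t' || c == ',' || c == ')')) = [] := by
        rw [List.drop_eq_getElem_cons h]
        exact List.takeWhile_cons_of_neg (by rcases ht with h'|h'|h'|h' <;> simp [h'])
      rw [hw]
      simp only [List.append_nil, Nat.add_zero, List.length_nil]
      rw [if_neg htok]
  | case3 p tok h ht ih =>
      have hterm : ((fun c => !(c == ' ' || c == '\t' || c == ',' || c == ')')) cs[p]) = true := by
        simp only [Bool.not_eq_true']
        simp only [not_or] at ht
        simp [ht.1, ht.2.1, ht.2.2.1, ht.2.2.2]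
      have hw : (cs.drop p).takeWhile (fun c => !(c == ' ' || c == '\t' || c == ',' || c == ')')) =
          cs[p] :: (cs.drop (p+1)).takeWhile (fun c => !(c == ' ' || c == '\t' || c == ',' || c == ')')) := by
        rw [List.drop_eq_getElem_cons h]
        exact List.takeWhile_cons_of_pos hterm
      rw [ih, hw]
      simp only [List.append_assoc, List.singleton_append, List.length_cons]
      set m := ((cs.drop (p+1)).takeWhile (fun c => !(c == ' ' || c == '\t' || c == ',' || c == ')'))).length with hm
      rw [show p + (m + 1) = p + 1 + m from by omega]
  | case4 p tok h htok =>
      rw [List.drop_eq_nil_of_le (by omega)]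
      simp only [List.takeWhile_nil, List.append_nil, Nat.add_zero, List.length_nil]
      rw [if_pos htok, List.drop_eq_nil_of_le (show cs.length ≤ p from by omega), List.append_nil]
  | case5 p tok h htok =>
      rw [List.drop_eq_nil_of_le (by omega)]
      simp only [List.takeWhile_nil, List.append_nil, Nat.add_zero, List.length_nil]
      rw [if_neg htok]

-- proof-side abbreviation for where state AFTER can end up
def pvAfterSpec (cs : List Char) (j r sp' : Nat) : String :=
  if j < cs.length then
    if cs.getD j ' ' = '*' then pvSize cs (j+1) sp' []
    else if cs.getD j ' ' = '(' then String.ofList cs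
    else if cs.getD j ' ' = ',' ∨ 0 < sp' then
      String.ofList (cs.take r ++ "(kind=4)".toList ++ cs.drop r)
    else String.ofList cs
  else String.ofList (cs.take r ++ "(kind=4)".toList ++ cs.drop r)

-- state AFTER ends at the first non-space j; p - sp (the insert position) is invariant
theorem pvAfter_eq (cs : List Char) (p sp : Nat) (hsp : sp ≤ p) :
    pvAfter cs p sp =
      pvAfterSpec cs (p + ((cs.drop p).takeWhile (fun c => c == ' ')).length) (p - sp)
        (sp + ((cs.drop p).takeWhile (fun c => c == ' ')).length) := by
  fun_induction pvAfter cs p sp with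
  | case1 p sp h hc ih =>
      have hw : (cs.drop p).takeWhile (fun c => c == ' ') =
          cs[p] :: (cs.drop (p+1)).takeWhile (fun c => c == ' ') := by
        rw [List.drop_eq_getElem_cons h]
        exact List.takeWhile_cons_of_pos (by simp [hc])
      rw [ih (by omega), hw]
      simp only [List.length_cons]
      congr 1 <;> omega
  | case2 p sp h hc hs =>
      have hw : (cs.drop p).takeWhile (fun c => c == ' ') = [] := by
        rw [List.drop_eq_getElem_cons h]
        exact List.takeWhile_cons_of_neg (by simp [hc])
      rw [hw, pvAfterSpec]
      simp only [List.length_nil, Nat.add_zero, List.getD_eq_getElem?_getD,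
        List.getElem?_eq_getElem h, Option.getD_some]
      rw [if_pos h]
      rw [if_pos hs]
  | case3 p sp h hc hs hp =>
      have hw : (cs.drop p).takeWhile (fun c => c == ' ') = [] := by
        rw [List.drop_eq_getElem_cons h]
        exact List.takeWhile_cons_of_neg (by simp [hc])
      rw [hw, pvAfterSpec]
      simp only [List.length_nil, Nat.add_zero, List.getD_eq_getElem?_getD,
        List.getElem?_eq_getElem h, Option.getD_some]
      rw [if_pos h]
      rw [if_neg hs, if_pos hp]
  | case4 p sp h hc hs hp hd =>
      have hw : (cs.drop p).takeWhile (fun c => c == ' ') = [] := by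
        rw [List.drop_eq_getElem_cons h]
        exact List.takeWhile_cons_of_neg (by simp [hc])
      rw [hw, pvAfterSpec]
      simp only [List.length_nil, Nat.add_zero, List.getD_eq_getElem?_getD,
        List.getElem?_eq_getElem h, Option.getD_some]
      rw [if_pos h]
      rw [if_neg hs, if_neg hp, if_pos (by exact hd)]
  | case5 p sp h hc hs hp hd =>
      have hw : (cs.drop p).takeWhile (fun c => c == ' ') = [] := by
        rw [List.drop_eq_getElem_cons h]
        exact List.takeWhile_cons_of_neg (by simp [hc])
      rw [hw, pvAfterSpec]
      simp only [List.length_nil, Nat.add_zero, List.getD_eq_getElem?_getD,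
        List.getElem?_eq_getElem h, Option.getD_some]
      rw [if_pos h]
      rw [if_neg hs, if_neg hp, if_neg (by exact hd)]
  | case6 p sp h =>
      have hw : (cs.drop p).takeWhile (fun c => c == ' ') = [] := by
        rw [List.drop_eq_nil_of_le (show cs.length ≤ p from by omega)]
        simp
      rw [hw, pvAfterSpec]
      simp only [List.length_nil, Nat.add_zero]
      rw [if_neg (show ¬ p < cs.length from h)]

-- state KEY from slot k is the lowercased-(7-k)-char-slice test
theorem pvKey_eq (cs : List Char) (p k : Nat) (hk : k ≤ 7) :
    pvKey cs p k =
      (if PySem.Chars.lower ((cs.drop p).take (7 - k)) = "integer".toList.drop k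
       then pvAfter cs (p + (7 - k)) 0 else String.ofList cs) := by
  fun_induction pvKey cs p k with
  | case1 p k hk7 c hc hm ih =>
      rw [ih (by omega)]
      have hlt : p < cs.length := by
        by_contra hge
        rw [List.getElem?_eq_none (by omega)] at hc
        simp at hc
      have hcc : cs[p] = c := by
        have := hc; rw [List.getElem?_eq_getElem hlt] at this; exact Option.some.inj this
      rw [List.drop_eq_getElem_cons hlt, hcc]
      have h7 : 7 - k = (7 - (k+1)) + 1 := by omega
      rw [h7, List.take_succ_cons, lower_cons]
      have htarget : "integer".toList.drop k = "integer".toList.getD k ' ' :: "integer".toList.drop (k+1) := by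
        have hkl : k < ("integer".toList).length := by simp; omega
        rw [List.drop_eq_getElem_cons hkl, List.getD_eq_getElem?_getD, List.getElem?_eq_getElem hkl]
        simp
      rw [htarget]
      simp only [List.cons.injEq, hm, true_and]
      have e : p + (7 - (k+1) + 1) = p + 1 + (7 - (k+1)) := by omega
      rw [e]
  | case2 p k hk7 c hc hm =>
      have hlt : p < cs.length := by
        by_contra hge
        rw [List.getElem?_eq_none (by omega)] at hc
        simp at hc
      have hcc : cs[p] = c := by
        have := hc; rw [List.getElem?_eq_getElem hlt] at this; exact Option.some.inj this
      rw [List.drop_eq_getElem_cons hlt, hcc]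
      have h7 : 7 - k = (7 - (k+1)) + 1 := by omega
      rw [h7, List.take_succ_cons, lower_cons]
      have htarget : "integer".toList.drop k = "integer".toList.getD k ' ' :: "integer".toList.drop (k+1) := by
        have hkl : k < ("integer".toList).length := by simp; omega
        rw [List.drop_eq_getElem_cons hkl, List.getD_eq_getElem?_getD, List.getElem?_eq_getElem hkl]
        simp
      rw [htarget]
      rw [if_neg (fun hcontra => hm (List.cons.inj hcontra).1)]
  | case3 p k hk7 hc =>
      have hnil : cs.drop p = [] := by
        rw [List.drop_eq_nil_of_le]
        exact le_of_not_gt (fun hlt => by rw [List.getElem?_eq_getElem hlt] at hc; simp at hc)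
      rw [hnil]
      have : "integer".toList.drop k ≠ [] := by
        intro h
        have := congrArg List.length h
        simp at this; omega
      rw [if_neg (by simpa [PySem.Chars.lower] using (Ne.symm this))]
  | case4 p k hk7 =>
      have hk' : k = 7 := by omega
      subst hk'
      simp [PySem.Chars.lower]

-- state LEAD passes exactly the leading blank run
theorem pvLead_eq (cs : List Char) (p : Nat) :
    pvLead cs p = pvKey cs (p + ((cs.drop p).takeWhile (fun c => c == ' ' || c == '\t')).length) 0 := by
  fun_induction pvLead cs p with
  | case1 p h hc ih =>
      rw [ih, List.drop_eq_getElem_cons h, List.takeWhile_cons_of_pos (by simpa using hc)]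
      simp only [List.length_cons]
      congr 1
      omega
  | case2 p h hc =>
      rw [List.drop_eq_getElem_cons h, List.takeWhile_cons_of_neg (by simpa using hc)]
      simp
  | case3 p h =>
      rw [List.drop_eq_nil_of_le (by omega)]
      simp


-- ===== VERDICT (by name: the statement is the Claim_ definition above) =====
theorem fix_integer_py_spec : Claim_equal_fix_integer_py := by
  intro text _
  show fix_integer_py text = fix_integer_py_alt text
  have hof : String.ofList text.toList = text := String.ofList_toList
  simp only [fix_integer_py, fix_integer_py_alt, pvScan_eq, pvLead_eq, List.drop_zero, Nat.zero_add]
  set cs := text.toList with hcs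
  rw [pvKey_eq cs _ 0 (by omega)]
  set istr := (cs.takeWhile (fun c => c == ' ' || c == '\t')).length with histr
  have histr_le : istr ≤ cs.length := by
    rw [histr]
    exact (List.takeWhile_sublist _).length_le
  simp only [Nat.sub_zero, List.drop_zero]
  -- keyword condition on both sides
  by_cases hkw : PySem.Chars.lower ((cs.drop istr).take 7) = "integer".toList
  · -- keyword matches; A's short-length guard must be false
    have hlen : istr + 7 ≤ cs.length := by
      have h2 := congrArg List.length hkw
      rw [len_lower, List.length_take, List.length_drop] at h2
      simp at h2
      omega
    rw [if_neg (show ¬ istr + 6 ≥ cs.length by omega),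
        if_neg (show ¬ PySem.Chars.lower ((cs.drop istr).take 7) ≠ "integer".toList from fun h => h hkw),
        if_pos hkw]
    rw [pvAfter_eq cs (istr + 7) 0 (by omega)]
    simp only [pvAfterSpec, Nat.sub_zero, Nat.zero_add]
    have e671 : istr + 6 + 1 = istr + 7 := by omega
    rw [e671]
    set L := ((cs.drop (istr + 7)).takeWhile (fun c => c == ' ')).length with hL
    set j := istr + 7 + L with hj
    have hj_ge : istr + 7 ≤ j := by omega
    have hdropj : cs.drop j = (cs.drop (istr + 7)).dropWhile (fun c => c == ' ') := by
      rw [hj, hL, ← List.drop_drop, drop_len_takeWhile]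
    have hgetD : ∀ d, cs.getD j d = ((cs.drop (istr+7)).dropWhile (fun c => c == ' ')).head?.getD d := by
      intro d
      rw [List.getD_eq_getElem?_getD, ← List.head?_drop, hdropj]
    have hnosp : cs.getD j ' ' ≠ ' ' ∨ j ≥ cs.length := by
      by_cases hjl : j < cs.length
      · left
        rw [hgetD]
        cases hh : ((cs.drop (istr+7)).dropWhile (fun c => c == ' ')).head? with
        | none =>
            exfalso
            rw [← hdropj] at hh
            rw [List.head?_drop] at hh
            rw [List.getElem?_eq_getElem hjl] at hh
            simp at hh
        | some x =>
            have hx := List.head?_dropWhile_not (fun c => c == ' ') (cs.drop (istr + 7))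
            rw [hh] at hx
            simp only [Option.getD_some]
            intro he
            rw [he] at hx
            simp at hx
      · right; omega
    by_cases hjl : j < cs.length
    · rw [if_pos hjl]
      by_cases hstar : cs.getD j ' ' = '*'
      · rw [if_pos hstar, if_pos ⟨hjl, hstar⟩]
        rw [pvSize_eq]
        simp only [List.nil_append]
        set w := ((cs.drop (j+1)).takeWhile (fun c => !(c == ' ' || c == '\t' || c == ',' || c == ')'))) with hw
        have hsize : (cs.drop (j+1)).take (j + 1 + w.length - (j+1)) = w := by
          have e : j + 1 + w.length - (j+1) = w.length := by omega
          rw [e, hw, take_len_takeWhile]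
        rw [hsize]
        have epos : j + 1 + w.length - L - 1 - w.length = istr + 7 := by omega
        rw [epos, hof]
      · rw [if_neg hstar, if_neg (fun h => hstar h.2)]
        by_cases hpar : cs.getD j ' ' = '('
        · rw [if_pos hpar, if_pos ⟨hjl, hpar⟩, hof]
        · rw [if_neg hpar, if_neg (fun h => hpar h.2)]
          have hsp : cs.getD j ' ' ≠ ' ' := by
            rcases hnosp with h | h
            · exact h
            · omega
          have hcond : (istr + 7 < j ∨ cs.length ≤ j ∨ cs.getD j ' ' = ' ' ∨ cs.getD j ' ' = ',')
              ↔ (cs.getD j ' ' = ',' ∨ 0 < L) := by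
            constructor
            · rintro (h | h | h | h)
              · right; omega
              · omega
              · exact absurd h hsp
              · left; exact h
            · rintro (h | h)
              · right; right; right; exact h
              · left; omega
          by_cases hd : cs.getD j ' ' = ',' ∨ 0 < L
          · rw [if_pos (hcond.mpr hd), if_pos hd]
          · rw [if_neg (fun h => hd (hcond.mp h)), if_neg hd, hof]
    · rw [if_neg hjl,
          if_neg (show ¬(j < cs.length ∧ cs.getD j ' ' = '*') from fun h => hjl h.1),
          if_neg (show ¬(j < cs.length ∧ cs.getD j ' ' = '(') from fun h => hjl h.1),
          if_pos (show istr + 7 < j ∨ cs.length ≤ j ∨ cs.getD j ' ' = ' ' ∨ cs.getD j ' ' = ','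
            from Or.inr (Or.inl (by omega)))]
  · -- keyword fails: both unchanged
    rw [if_neg hkw]
    by_cases h7 : istr + 6 ≥ cs.length
    · rw [if_pos h7, hof]
    · rw [if_neg h7, if_pos (show PySem.Chars.lower ((cs.drop istr).take 7) ≠ "integer".toList from hkw), hof]
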